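-- pv_equiv track=rewrite | github.com/barrel-0314/ECIF | test.py | get_train_filter_c_2p
-- ===== SOURCE A (Python) =====
-- def get_train_filter_c_2p(train_answers_1p_e, train_answers_2p_c, is_dict_train):
--     ret = {}
--     for query in train_answers_2p_c:
--         filters = set()
--         answers_1 = train_answers_1p_e.get((query[0], query[1]), set())
--         for answer_1 in answers_1:
--             answers_2 = train_answers_1p_e.get((answer_1, query[2]), set())
--             for answer_2 in answers_2:
--                 concepts = is_dict_train.get(answer_2, set())
--                 for concept in concepts:
--                     filters.add(concept)
--         ret[query] = filters
--     return ret
-- ===== SOURCE B (Python) =====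
-- def get_train_filter_c_2p(train_answers_1p_e, train_answers_2p_c, is_dict_train):
--     # Two staged dict comprehensions instead of four nested accumulator loops:
--     # stage 1 builds, per (entity, relation) key, the union of the concept sets
--     # of its one-hop answers; stage 2 answers each query by unioning the cached
--     # sets of its first-hop answers.
--     union_cache = {key: set().union(*(is_dict_train.get(a, set()) for a in answers))
--                    for key, answers in train_answers_1p_e.items()}
--     return {q: set().union(*(union_cache.get((a1, q[2]), set())
--                              for a1 in train_answers_1p_e.get((q[0], q[1]), set())))
--             for q in train_answers_2p_c}
-- ===== Notes on version B (the rewrite author's own statement) =====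
-- stated objective: alternative
-- what changed: A re-walks second-hop answers and their concept lists inside every query with four nested mutating loops; B is two staged dict comprehensions: the first precomputes, per (entity, relation) key, the union of its answers' concept sets, and the second maps each query to the union of the cached sets of its first-hop answers, so the two inner per-query loops disappear.
import Mathlib
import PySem

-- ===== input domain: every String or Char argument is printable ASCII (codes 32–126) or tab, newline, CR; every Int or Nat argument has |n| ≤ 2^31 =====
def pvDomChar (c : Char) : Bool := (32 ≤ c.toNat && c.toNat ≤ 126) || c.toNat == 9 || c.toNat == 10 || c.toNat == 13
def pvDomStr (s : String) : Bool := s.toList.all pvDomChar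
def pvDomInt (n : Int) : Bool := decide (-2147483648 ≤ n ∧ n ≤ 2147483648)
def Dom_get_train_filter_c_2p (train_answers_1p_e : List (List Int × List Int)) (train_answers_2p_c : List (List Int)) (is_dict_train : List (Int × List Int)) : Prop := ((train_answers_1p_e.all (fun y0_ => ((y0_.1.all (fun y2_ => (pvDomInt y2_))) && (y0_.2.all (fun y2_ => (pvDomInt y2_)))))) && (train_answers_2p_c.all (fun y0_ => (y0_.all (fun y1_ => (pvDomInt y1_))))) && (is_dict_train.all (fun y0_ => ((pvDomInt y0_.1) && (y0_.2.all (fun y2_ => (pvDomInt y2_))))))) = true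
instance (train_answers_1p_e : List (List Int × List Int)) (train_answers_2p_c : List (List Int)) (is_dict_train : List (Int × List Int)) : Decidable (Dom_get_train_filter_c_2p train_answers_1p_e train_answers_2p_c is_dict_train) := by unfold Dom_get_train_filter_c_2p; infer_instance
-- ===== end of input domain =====

-- ===== PORT A =====
-- A: for each query, walk first-hop answers, second-hop answers and their concept
-- lists, adding every concept to a fresh mutable set; dict arguments are assoc
-- lists, materialised with Dict.ofList exactly as Python builds them.
def get_train_filter_c_2p (train_answers_1p_e : List (List Int × List Int)) (train_answers_2p_c : List (List Int)) (is_dict_train : List (Int × List Int)) : List (List Int × List Int) :=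
  let tae : PySem.Dict (List Int) (List Int) := PySem.Dict.ofList train_answers_1p_e
  let idt : PySem.Dict Int (List Int) := PySem.Dict.ofList is_dict_train
  (train_answers_2p_c.foldl (fun ret query =>
      let answers_1 := tae.getD [PySem.List.pyGetD query 0 0, PySem.List.pyGetD query 1 0] []
      let filters := answers_1.foldl (fun filters answer_1 =>
          let answers_2 := tae.getD [answer_1, PySem.List.pyGetD query 2 0] []
          answers_2.foldl (fun filters answer_2 =>
              (idt.getD answer_2 []).foldl PySem.Set.add filters) filters)
        PySem.Set.empty
      ret.insert query filters) PySem.Dict.empty).items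

-- ===== PORT B =====
-- B: two staged dict comprehensions; set().union(*iterables) is folding Set.update
-- over the list of iterables (pvBigUnion).
def pvBigUnion (ls : List (PySem.Set Int)) : PySem.Set Int :=
  ls.foldl PySem.Set.update PySem.Set.empty

def get_train_filter_c_2p_alt (train_answers_1p_e : List (List Int × List Int)) (train_answers_2p_c : List (List Int)) (is_dict_train : List (Int × List Int)) : List (List Int × List Int) :=
  let tae : PySem.Dict (List Int) (List Int) := PySem.Dict.ofList train_answers_1p_e
  let idt : PySem.Dict Int (List Int) := PySem.Dict.ofList is_dict_train
  let union_cache : PySem.Dict (List Int) (PySem.Set Int) :=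
    PySem.Dict.ofList (tae.items.map (fun kv =>
      (kv.1, pvBigUnion (kv.2.map (fun a => idt.getD a [])))))
  (PySem.Dict.ofList (train_answers_2p_c.map (fun q =>
      (q, pvBigUnion ((tae.getD [PySem.List.pyGetD q 0 0, PySem.List.pyGetD q 1 0] []).map
            (fun a1 => union_cache.getD [a1, PySem.List.pyGetD q 2 0] PySem.Set.empty)))))).items

-- ===== PRECONDITION & SPEC =====
-- Pre_ excludes exactly the inputs on which the Python A raises IndexError: a query
-- shorter than 2 (query[0]/query[1] fail), or a length-2 query whose first-hop answer
-- set is non-empty (query[2] is then evaluated and fails).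
def Pre_get_train_filter_c_2p (train_answers_1p_e : List (List Int × List Int)) (train_answers_2p_c : List (List Int)) (is_dict_train : List (Int × List Int)) : Prop :=
  ∀ q ∈ train_answers_2p_c, 2 ≤ q.length ∧
    (3 ≤ q.length ∨ (PySem.Dict.ofList train_answers_1p_e).getD [q.headI, q.tail.headI] [] = [])
instance (train_answers_1p_e : List (List Int × List Int)) (train_answers_2p_c : List (List Int)) (is_dict_train : List (Int × List Int)) : Decidable (Pre_get_train_filter_c_2p train_answers_1p_e train_answers_2p_c is_dict_train) := by unfold Pre_get_train_filter_c_2p; infer_instance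

def pvWitness_get_train_filter_c_2p : (List (List Int × List Int)) × List (List Int) × (List (Int × List Int)) :=
  ([([1, 2], [3, 4])], [[1, 2, 5], [9, 9]], [(3, [7, 8]), (4, [8])])

def Spec_get_train_filter_c_2p (train_answers_1p_e : List (List Int × List Int)) (train_answers_2p_c : List (List Int)) (is_dict_train : List (Int × List Int)) (out : List (List Int × List Int)) : Prop := out = get_train_filter_c_2p_alt train_answers_1p_e train_answers_2p_c is_dict_train
instance (train_answers_1p_e : List (List Int × List Int)) (train_answers_2p_c : List (List Int)) (is_dict_train : List (Int × List Int)) (out : List (List Int × List Int)) : Decidable (Spec_get_train_filter_c_2p train_answers_1p_e train_answers_2p_c is_dict_train out) := by unfold Spec_get_train_filter_c_2p; infer_instance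

-- ===== CLAIM (what is proved, stated in full; the proofs are below) =====
def Claim_equal_get_train_filter_c_2p : Prop := ∀ (train_answers_1p_e : List (List Int × List Int)) (train_answers_2p_c : List (List Int)) (is_dict_train : List (Int × List Int)), Dom_get_train_filter_c_2p train_answers_1p_e train_answers_2p_c is_dict_train → Pre_get_train_filter_c_2p train_answers_1p_e train_answers_2p_c is_dict_train → Spec_get_train_filter_c_2p train_answers_1p_e train_answers_2p_c is_dict_train (get_train_filter_c_2p train_answers_1p_e train_answers_2p_c is_dict_train)

-- ===== LEMMAS AND PROOFS =====

-- update distributes over a single add of the second argument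
lemma pv_update_add (f s : PySem.Set Int) (x : Int) :
    PySem.Set.update f (PySem.Set.add s x) = PySem.Set.add (PySem.Set.update f s) x := by
  by_cases hx : x ∈ s
  · rw [PySem.Set.add_of_mem hx,
      PySem.Set.add_of_mem ((PySem.Set.mem_update f s x).2 (Or.inr hx))]
  · rw [PySem.Set.add_of_not_mem hx, PySem.Set.update_append, PySem.Set.update_cons,
      PySem.Set.update_nil]

-- update is "associative": adding an already-deduplicated union gives the same set
lemma pv_update_update (l : List Int) (f s : PySem.Set Int) :
    PySem.Set.update f (PySem.Set.update s l) = PySem.Set.update (PySem.Set.update f s) l := by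
  induction l generalizing s with
  | nil => rfl
  | cons x l ih => rw [PySem.Set.update_cons, ih, pv_update_add, PySem.Set.update_cons]

-- hoisting an initial update out of a fold of updates
lemma pv_hoist (g : Int → List Int) (ans : List Int) (f s : PySem.Set Int) :
    ans.foldl (fun t a => PySem.Set.update t (g a)) (PySem.Set.update f s)
      = PySem.Set.update f (ans.foldl (fun t a => PySem.Set.update t (g a)) s) := by
  induction ans generalizing s with
  | nil => rfl
  | cons a ans ih => simp only [List.foldl_cons]; rw [← pv_update_update, ih]

-- A's inner double loop over one first-hop answer equals one update with the cached union
lemma pv_inner (g : Int → List Int) (ans : List Int) (f : PySem.Set Int) :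
    ans.foldl (fun t a => PySem.Set.update t (g a)) f
      = PySem.Set.update f (ans.foldl (fun t a => PySem.Set.update t (g a)) PySem.Set.empty) := by
  exact pv_hoist g ans f PySem.Set.empty

-- B's pvBigUnion over a mapped list is A's fold of updates
lemma pv_bigUnion_map (g : Int → PySem.Set Int) (l : List Int) :
    pvBigUnion (l.map g) = l.foldl (fun s a => PySem.Set.update s (g a)) PySem.Set.empty := by
  unfold pvBigUnion; rw [List.foldl_map]

-- Dict.ofList is the insert fold (definitional)
lemma pv_ofList_foldl {κ ν : Type} [BEq κ] (l : List (κ × ν)) :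
    PySem.Dict.ofList l = l.foldl (fun d p => d.insert p.1 p.2) PySem.Dict.empty := rfl

-- the cache lookup returns exactly the union A computes for that key
lemma pv_cu_getD (tae : PySem.Dict (List Int) (List Int)) (idt : PySem.Dict Int (List Int))
    (hnd : (tae.items.map Prod.fst).Nodup) (k : List Int) :
    ((PySem.Dict.ofList (tae.items.map (fun kv =>
        (kv.1, pvBigUnion (kv.2.map (fun a => idt.getD a [])))))).getD k PySem.Set.empty)
      = (tae.getD k []).foldl (fun s a => PySem.Set.update s (idt.getD a [])) PySem.Set.empty := by
  rw [pv_ofList_foldl, List.foldl_map]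
  have hitems := PySem.Dict.items_foldl_insert_fresh tae.items Prod.fst
    (fun kv => pvBigUnion (kv.2.map (fun a => idt.getD a [])))
    PySem.Dict.empty (fun a _ => by simp [PySem.Dict.contains_empty]) hnd
  rw [PySem.Dict.getD_eq_get?_getD, PySem.Dict.getD_eq_get?_getD]
  simp only [PySem.Dict.get?]
  rw [hitems]
  simp only [PySem.Dict.empty, List.nil_append, List.find?_map, Function.comp_def]
  cases htae : tae.items.find? (fun p => p.1 == k) <;>
    simp [pv_bigUnion_map (fun a => idt.getD a [])]

-- ===== VERDICT (by name: the statement is the Claim_ definition above) =====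
theorem get_train_filter_c_2p_spec : Claim_equal_get_train_filter_c_2p := by
  intro tae_l qs idt_l _ _
  unfold Spec_get_train_filter_c_2p get_train_filter_c_2p get_train_filter_c_2p_alt
  apply congrArg PySem.Dict.items
  rw [pv_ofList_foldl (qs.map _), List.foldl_map]
  apply PySem.List.foldl_congr_mem
  intro acc q _
  apply congrArg (PySem.Dict.insert acc q)
  have hnd : ((PySem.Dict.ofList tae_l : PySem.Dict (List Int) (List Int)).items.map Prod.fst).Nodup := by
    have h := PySem.Dict.nodup_keys_ofList (κ := List Int) (ν := List Int) tae_l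
    simpa [PySem.Dict.keys] using h
  rw [pv_bigUnion_map]
  apply PySem.List.foldl_congr_mem
  intro f a1 _
  show List.foldl (fun t a => PySem.Set.update t ((PySem.Dict.ofList idt_l).getD a []))
      f ((PySem.Dict.ofList tae_l).getD [a1, PySem.List.pyGetD q 2 0] []) = _
  rw [pv_inner (fun a => (PySem.Dict.ofList idt_l).getD a []),
    pv_cu_getD _ _ hnd]
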